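-- pv_equiv track=rewrite | github.com/nantoniou/Algorithms-data-structures | assignment-2018-3/boolean_complexity.py | already_used
-- ===== SOURCE A (Python) =====
-- def already_used(group, groups):
-- 	checking_values = []
-- 	for key in list(groups.keys()):
-- 		if key >= len(group):
-- 			checking_values.append(key)
-- 	already_used_sum = 0
-- 	for z in group:
-- 		for x in checking_values:
-- 			for y in groups[x]:
-- 				if z in y:
-- 					already_used_sum += 1
-- 					if already_used_sum == len(group):
-- 						return True
-- 	return False
-- ===== SOURCE B (Python) =====
-- def already_used(group, groups):
--     n = len(group)
--     if n == 0:
--         return False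
--     cnt = {}
--     for z in group:
--         cnt[z] = cnt.get(z, 0) + 1
--     total = 0
--     for key, lists in groups.items():
--         if key >= n:
--             for y in lists:
--                 for e in set(y):
--                     total += cnt.get(e, 0)
--     return total >= n
-- ===== Notes on version B (the rewrite author's own statement) =====
-- stated objective: faster
-- what changed: Replaces A's triple nested scan with early exit by one-pass counting: B builds a multiplicity map of group, sums per qualifying sublist the multiplicities of its distinct elements in a single pass over groups, and compares the total to len(group); Pre_ only excludes association lists with duplicate keys, which cannot arise from a Python dict.
import Mathlib
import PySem

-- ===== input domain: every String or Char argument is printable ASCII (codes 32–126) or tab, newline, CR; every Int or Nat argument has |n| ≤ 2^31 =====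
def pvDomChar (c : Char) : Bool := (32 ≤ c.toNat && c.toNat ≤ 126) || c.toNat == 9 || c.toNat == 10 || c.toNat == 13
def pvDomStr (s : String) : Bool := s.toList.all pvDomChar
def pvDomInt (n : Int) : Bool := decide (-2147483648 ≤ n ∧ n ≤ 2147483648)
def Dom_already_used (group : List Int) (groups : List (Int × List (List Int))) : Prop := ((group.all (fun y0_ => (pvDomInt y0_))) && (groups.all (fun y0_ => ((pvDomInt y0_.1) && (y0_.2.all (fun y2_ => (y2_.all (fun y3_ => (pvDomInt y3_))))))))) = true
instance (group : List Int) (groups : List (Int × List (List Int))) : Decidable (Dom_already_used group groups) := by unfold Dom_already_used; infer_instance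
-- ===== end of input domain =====

-- B replaces A's triple nested scan (O(|group|·N)) by one-pass counting over groups
-- plus a multiplicity map of group (O(|group|+N)); return value only, no mutation.

-- ===== PORT A =====
-- inner 'for y in groups[x]' loop: some s = fall through with updated sum, none = 'return True'
def auLoopY (z n : Int) (s : Int) : List (List Int) → Option Int
  | [] => some s
  | y :: rest =>
    if z ∈ y then
      if s + 1 = n then none else auLoopY z n (s + 1) rest
    else auLoopY z n s rest

-- 'for x in checking_values' loop; groups[x] never raises since x comes from groups.keys(),
-- so the total getD with default [] is exact here
def auLoopX (d : PySem.Dict Int (List (List Int))) (z n : Int) (s : Int) : List Int → Option Int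
  | [] => some s
  | x :: rest =>
    match auLoopY z n s (d.getD x []) with
    | none => none
    | some s' => auLoopX d z n s' rest

-- 'for z in group' loop
def auLoopZ (d : PySem.Dict Int (List (List Int))) (cv : List Int) (n : Int) (s : Int) : List Int → Option Int
  | [] => some s
  | z :: rest =>
    match auLoopX d z n s cv with
    | none => none
    | some s' => auLoopZ d cv n s' rest

def already_used (group : List Int) (groups : List (Int × List (List Int))) : Bool :=
  let d : PySem.Dict Int (List (List Int)) := PySem.Dict.mk groups
  let n : Int := group.length
  let checking_values : List Int :=
    d.keys.foldl (fun acc key => if key ≥ n then acc ++ [key] else acc) []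
  match auLoopZ d checking_values n 0 group with
  | none => true
  | some _ => false

-- ===== PORT B =====
def already_used_alt (group : List Int) (groups : List (Int × List (List Int))) : Bool :=
  let n : Int := group.length
  if group.length = 0 then false
  else
    let cnt : PySem.Dict Int Int :=
      group.foldl (fun d z => d.insert z (d.getD z 0 + 1)) PySem.Dict.empty
    let total : Int := groups.foldl (fun t kv =>
      if kv.1 ≥ n then
        kv.2.foldl (fun t y =>
          (PySem.Set.ofList y).foldl (fun t e => t + cnt.getD e 0) t) t
      else t) 0
    decide (n ≤ total)

-- ===== PRECONDITION & SPEC =====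
-- Pre_ excludes association lists with duplicate keys: a Python dict cannot contain them,
-- and on such lists A's keys/first-match-lookup reading is an artefact of the encoding.
def Pre_already_used (group : List Int) (groups : List (Int × List (List Int))) : Prop :=
  (groups.map Prod.fst).Nodup
instance (group : List Int) (groups : List (Int × List (List Int))) : Decidable (Pre_already_used group groups) := by unfold Pre_already_used; infer_instance

def pvWitness_already_used : List Int × (List (Int × List (List Int))) :=
  ([1, 2], [(2, [[1, 3], [2]]), (5, [[2, 1]])])

def Spec_already_used (group : List Int) (groups : List (Int × List (List Int))) (out : Bool) : Prop := out = already_used_alt group groups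
instance (group : List Int) (groups : List (Int × List (List Int))) (out : Bool) : Decidable (Spec_already_used group groups out) := by unfold Spec_already_used; infer_instance

-- ===== CLAIM (what is proved, stated in full; the proofs are below) =====
def Claim_equal_already_used : Prop := ∀ (group : List Int) (groups : List (Int × List (List Int))), Dom_already_used group groups → Pre_already_used group groups → Spec_already_used group groups (already_used group groups)

-- ===== LEMMAS AND PROOFS =====

-- indicator sums
def auCY (z : Int) (ys : List (List Int)) : Int :=
  (ys.map (fun y => if z ∈ y then (1 : Int) else 0)).sum

lemma auCY_nonneg (z : Int) (ys : List (List Int)) : 0 ≤ auCY z ys := by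
  induction ys with
  | nil => simp [auCY]
  | cons y t ih => simp only [auCY, List.map_cons, List.sum_cons] at *; split <;> omega

def auCX (d : PySem.Dict Int (List (List Int))) (z : Int) (xs : List Int) : Int :=
  (xs.map (fun x => auCY z (d.getD x []))).sum

lemma auCX_nonneg (d : PySem.Dict Int (List (List Int))) (z : Int) (xs : List Int) :
    0 ≤ auCX d z xs := by
  induction xs with
  | nil => simp [auCX]
  | cons x t ih =>
    simp only [auCX, List.map_cons, List.sum_cons] at *
    have := auCY_nonneg z (d.getD x []); omega

lemma auLoopY_eq (z n : Int) : ∀ (ys : List (List Int)) (s : Int), s < n →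
    auLoopY z n s ys = if n ≤ s + auCY z ys then none else some (s + auCY z ys) := by
  intro ys
  induction ys with
  | nil => intro s hs; simp [auLoopY, auCY]; omega
  | cons y t ih =>
    intro s hs
    have ht := auCY_nonneg z t
    by_cases hz : z ∈ y
    · simp only [auLoopY, if_pos hz]
      by_cases he : s + 1 = n
      · have : n ≤ s + auCY z (y :: t) := by
          simp only [auCY, List.map_cons, List.sum_cons, if_pos hz] at *; omega
        simp [he, this]
      · rw [if_neg he, ih (s + 1) (by omega)]
        simp only [auCY, List.map_cons, List.sum_cons, if_pos hz]
        split_ifs <;> first | rfl | omega | (exact absurd ‹_› (by omega)) | (congr 1; omega)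
    · simp only [auLoopY, if_neg hz, ih s hs]
      simp only [auCY, List.map_cons, List.sum_cons, if_neg hz]
      split_ifs <;> first | rfl | omega | (congr 1; omega)

lemma auLoopX_eq (d : PySem.Dict Int (List (List Int))) (z n : Int) :
    ∀ (xs : List Int) (s : Int), s < n →
    auLoopX d z n s xs = if n ≤ s + auCX d z xs then none else some (s + auCX d z xs) := by
  intro xs
  induction xs with
  | nil => intro s hs; simp [auLoopX, auCX]; omega
  | cons x t ih =>
    intro s hs
    have hy := auCY_nonneg z (d.getD x [])
    have htn := auCX_nonneg d z t
    simp only [auCX] at htn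
    rw [auLoopX, auLoopY_eq z n _ s hs]
    by_cases h : n ≤ s + auCY z (d.getD x [])
    · have : n ≤ s + auCX d z (x :: t) := by
        simp only [auCX, List.map_cons, List.sum_cons]; omega
      simp [h, this]
    · rw [if_neg h]
      simp only
      rw [ih (s + auCY z (d.getD x [])) (by omega)]
      simp only [auCX, List.map_cons, List.sum_cons]
      split_ifs <;> first | rfl | omega | (congr 1; omega)

lemma auLoopZ_eq (d : PySem.Dict Int (List (List Int))) (cv : List Int) (n : Int) :
    ∀ (zs : List Int) (s : Int), s < n →
    auLoopZ d cv n s zs =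
      if n ≤ s + (zs.map (fun z => auCX d z cv)).sum then none
      else some (s + (zs.map (fun z => auCX d z cv)).sum) := by
  intro zs
  induction zs with
  | nil => intro s hs; simp [auLoopZ]; omega
  | cons z t ih =>
    intro s hs
    have hz := auCX_nonneg d z cv
    have htn : 0 ≤ (t.map (fun z => auCX d z cv)).sum := by
      apply List.sum_nonneg; intro a ha
      simp only [List.mem_map] at ha; obtain ⟨b, _, rfl⟩ := ha; exact auCX_nonneg d b cv
    rw [auLoopZ, auLoopX_eq d z n cv s hs]
    by_cases h : n ≤ s + auCX d z cv
    · rw [if_pos h]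
      simp only [List.map_cons, List.sum_cons]
      rw [if_pos (by omega)]
    · rw [if_neg h]
      simp only
      rw [ih (s + auCX d z cv) (by omega)]
      simp only [List.map_cons, List.sum_cons]
      split_ifs <;> first | rfl | omega | (congr 1; omega)

-- generic sum lemmas
lemma auFoldlAdd {α : Type} (g : α → Int) : ∀ (L : List α) (t : Int),
    L.foldl (fun t e => t + g e) t = t + (L.map g).sum := by
  intro L
  induction L with
  | nil => intro t; simp
  | cons a t ih => intro s; simp [List.foldl, ih, add_assoc]

lemma auSumMapAdd {α : Type} (f g : α → Int) (L : List α) :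
    (L.map (fun a => f a + g a)).sum = (L.map f).sum + (L.map g).sum := by
  induction L with
  | nil => simp
  | cons a t ih => simp [ih]; ring

lemma auSumSwap {α β : Type} (f : α → β → Int) (A : List α) (B : List β) :
    (A.map (fun a => (B.map (f a)).sum)).sum = (B.map (fun b => (A.map (fun a => f a b)).sum)).sum := by
  induction A with
  | nil => simp [List.sum_eq_zero]
  | cons a t ih =>
    simp only [List.map_cons, List.sum_cons, ih]
    rw [← auSumMapAdd]

lemma auSumIfFilter {α : Type} (p : α → Prop) [DecidablePred p] (f : α → Int) (L : List α) :
    (L.map (fun a => if p a then f a else 0)).sum = ((L.filter (fun a => decide (p a))).map f).sum := by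
  induction L with
  | nil => simp
  | cons a t ih =>
    by_cases h : p a <;> simp [h, ih]

lemma auSumIndicator (a : Int) : ∀ (S : List Int), S.Nodup →
    (S.map (fun e => if a = e then (1 : Int) else 0)).sum = if a ∈ S then 1 else 0 := by
  intro S
  induction S with
  | nil => simp
  | cons e t ih =>
    intro hnd
    have hnd' := hnd
    rw [List.nodup_cons] at hnd'
    simp only [List.map_cons, List.sum_cons, ih hnd'.2, List.mem_cons]
    by_cases hae : a = e
    · subst hae
      simp [hnd'.1]
    · simp [hae]

lemma auCountSum (S : List Int) (hS : S.Nodup) : ∀ (g : List Int),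
    (S.map (fun e => (g.count e : Int))).sum
      = (g.map (fun z => if z ∈ S then (1 : Int) else 0)).sum := by
  intro g
  induction g with
  | nil => simp [List.sum_eq_zero]
  | cons a t ih =>
    have hcnt : ∀ e : Int, ((a :: t).count e : Int) = (t.count e : Int) + (if e = a then 1 else 0) := by
      intro e; rw [List.count_cons]; by_cases h : e = a
      · simp [h]
      · have h2 : ¬a = e := fun he => h he.symm
        simp [h, h2]
    calc (S.map (fun e => ((a :: t).count e : Int))).sum
        = (S.map (fun e => (t.count e : Int) + (if e = a then 1 else 0))).sum := by
          apply congrArg; exact List.map_congr_left (fun e _ => hcnt e)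
      _ = (S.map (fun e => (t.count e : Int))).sum + (S.map (fun e => if e = a then (1:Int) else 0)).sum := by
          rw [← auSumMapAdd]
      _ = ((a :: t).map (fun z => if z ∈ S then (1 : Int) else 0)).sum := by
          rw [ih]
          have : (S.map (fun e => if e = a then (1:Int) else 0)).sum
              = (S.map (fun e => if a = e then (1:Int) else 0)).sum := by
            apply congrArg; apply List.map_congr_left; intro e _
            by_cases h : a = e <;> simp [h, eq_comm]
          rw [this, auSumIndicator a S hS]
          simp [add_comm]

lemma auFilterMap {a b : Type} (f : a -> b) (p : b -> Bool) : forall (l : List a),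
    (l.map f).filter p = (l.filter (fun x => p (f x))).map f := by
  intro l
  induction l with
  | nil => simp
  | cons x t ih => by_cases h : p (f x) <;> simp [h, ih]

lemma auTotalEq (group : List Int) (groups : List (Int × List (List Int)))
    (hpre : (groups.map Prod.fst).Nodup) :
    (group.map (fun z => auCX (PySem.Dict.mk groups) z
        ((PySem.Dict.mk groups).keys.foldl
          (fun acc key => if key ≥ (group.length : Int) then acc ++ [key] else acc) []))).sum
    = groups.foldl (fun t kv =>
        if kv.1 ≥ (group.length : Int) then
          kv.2.foldl (fun t y => (PySem.Set.ofList y).foldl (fun t e =>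
            t + (group.foldl (fun d z => d.insert z (d.getD z 0 + 1)) PySem.Dict.empty).getD e 0) t) t
        else t) 0 := by
  set d : PySem.Dict Int (List (List Int)) := PySem.Dict.mk groups with hd
  set cnt : PySem.Dict Int Int :=
    group.foldl (fun d z => d.insert z (d.getD z 0 + 1)) PySem.Dict.empty with hcntd
  have hcnt : ∀ e : Int, cnt.getD e 0 = (group.count e : Int) := by
    intro e
    rw [hcntd, PySem.Dict.getD_foldl_insert_add_one, PySem.Dict.getD_empty]
    ring
  have hitems : d.items = groups := rfl
  have hkeys : d.keys = groups.map Prod.fst := rfl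
  have hknd : d.keys.Nodup := by rw [hkeys]; exact hpre
  -- the per-sublist contribution
  have contribEq : ∀ y : List Int,
      ((PySem.Set.ofList y).map (fun e => cnt.getD e 0)).sum
        = (group.map (fun z => if z ∈ y then (1 : Int) else 0)).sum := by
    intro y
    have h1 : ((PySem.Set.ofList y).map (fun e => cnt.getD e 0)).sum
        = ((PySem.Set.ofList y).map (fun e => (group.count e : Int))).sum := by
      exact congrArg _ (List.map_congr_left (fun e _ => hcnt e))
    rw [h1, auCountSum (PySem.Set.ofList y) (PySem.Set.nodup_ofList y) group]
    apply congrArg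
    apply List.map_congr_left
    intro z _
    by_cases hz : z ∈ y <;> simp [hz, PySem.Set.mem_ofList]
  -- RHS: fold → sum
  have hinner : ∀ (y : List Int) (t : Int),
      (PySem.Set.ofList y).foldl (fun t e => t + cnt.getD e 0) t
        = t + ((PySem.Set.ofList y).map (fun e => cnt.getD e 0)).sum := by
    intro y t; exact auFoldlAdd _ _ t
  have hmid : ∀ (v : List (List Int)) (t : Int),
      v.foldl (fun t y => (PySem.Set.ofList y).foldl (fun t e => t + cnt.getD e 0) t) t
        = t + (v.map (fun y => ((PySem.Set.ofList y).map (fun e => cnt.getD e 0)).sum)).sum := by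
    intro v
    induction v with
    | nil => intro t; simp
    | cons y w ih =>
      intro t
      simp only [List.foldl_cons, ih, List.map_cons, List.sum_cons]
      rw [hinner]
      ring
  have houter : ∀ (L : List (Int × List (List Int))) (t : Int),
      L.foldl (fun t kv =>
        if kv.1 ≥ (group.length : Int) then
          kv.2.foldl (fun t y => (PySem.Set.ofList y).foldl (fun t e => t + cnt.getD e 0) t) t
        else t) t
      = t + (L.map (fun kv => if kv.1 ≥ (group.length : Int) then
          (kv.2.map (fun y => ((PySem.Set.ofList y).map (fun e => cnt.getD e 0)).sum)).sum else 0)).sum := by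
    intro L
    induction L with
    | nil => intro t; simp
    | cons kv w ih =>
      intro t
      simp only [List.foldl_cons, List.map_cons, List.sum_cons]
      by_cases h : kv.1 ≥ (group.length : Int)
      · simp only [if_pos h]
        rw [ih, hmid]
        ring
      · simp only [if_neg h]
        rw [ih]
        ring
  rw [houter, zero_add]
  rw [auSumIfFilter (fun kv : Int × List (List Int) => kv.1 ≥ (group.length : Int))]
  -- LHS: checking_values = keys of the qualifying pairs
  have hcv : d.keys.foldl (fun acc key => if key ≥ (group.length : Int) then acc ++ [key] else acc) []
      = (groups.filter (fun kv => decide (kv.1 ≥ (group.length : Int)))).map Prod.fst := by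
    rw [PySem.List.foldl_append_ite_eq_filter, hkeys, auFilterMap]
    simp
  rw [hcv]
  set rel := groups.filter (fun kv => decide (kv.1 ≥ (group.length : Int))) with hrel
  have hlook : ∀ kv ∈ rel, d.getD kv.1 [] = kv.2 := by
    intro kv hkv
    have hmem : (kv.1, kv.2) ∈ d.items := by
      rw [hitems]
      exact List.mem_of_mem_filter hkv
    exact PySem.Dict.getD_of_mem_items d hmem hknd []
  have hLHS : ∀ z : Int,
      auCX d z (rel.map Prod.fst) = (rel.map (fun kv => auCY z kv.2)).sum := by
    intro z
    unfold auCX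
    rw [List.map_map]
    apply congrArg
    apply List.map_congr_left
    intro kv hkv
    simp only [Function.comp]
    rw [hlook kv hkv]
  have h2 : (group.map (fun z => auCX d z (rel.map Prod.fst))).sum
      = (group.map (fun z => (rel.map (fun kv => auCY z kv.2)).sum)).sum := by
    exact congrArg _ (List.map_congr_left (fun z _ => hLHS z))
  rw [h2, auSumSwap (fun z kv => auCY z kv.2) group rel]
  apply congrArg
  apply List.map_congr_left
  intro kv _
  -- per qualifying pair: swap group/sublists then use contribEq
  unfold auCY
  rw [auSumSwap (fun z y => if z ∈ y then (1 : Int) else 0) group kv.2]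
  apply congrArg
  apply List.map_congr_left
  intro y _
  rw [contribEq y]

-- ===== VERDICT (by name: the statement is the Claim_ definition above) =====
theorem already_used_spec : Claim_equal_already_used := by
  intro group groups _ hpre
  unfold Spec_already_used
  cases group with
  | nil => simp [already_used, already_used_alt, auLoopZ]
  | cons a g =>
    have hn : (0 : Int) < (((a :: g).length : Nat) : Int) := by
      simp [List.length_cons]
    have htot := auTotalEq (a :: g) groups hpre
    unfold already_used already_used_alt
    simp only []
    rw [auLoopZ_eq _ _ _ (a :: g) 0 hn]
    rw [← htot]
    have hne : ¬ (a :: g).length = 0 := by simp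
    rw [if_neg hne]
    by_cases h : (((a :: g).length : Nat) : Int)
        ≤ 0 + ((a :: g).map (fun z => auCX (PySem.Dict.mk groups) z
          ((PySem.Dict.mk groups).keys.foldl
            (fun acc key => if key ≥ (((a :: g).length : Nat) : Int) then acc ++ [key] else acc) []))).sum
    · rw [if_pos h]
      simp only [zero_add] at h
      exact (decide_eq_true h).symm
    · rw [if_neg h]
      simp only [zero_add] at h
      exact (decide_eq_false h).symm
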